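-- pv_equiv track=rewrite | github.com/MarcosP7635/Cognitive-behavioral-therapy | testing.py | is_no
-- ===== SOURCE A (Python) =====
-- def is_no(string):
--   substring_list = ("no", "No", "NO", "nO", "nah")
--   output = False
--   for substring in substring_list:
--     if substring in string:
--       output = True
--       return output
--   return output
-- ===== SOURCE B (Python) =====
-- def is_no(string):
--   return "no" in string.lower() or "nah" in string
-- ===== Notes on version B (the rewrite author's own statement) =====
-- stated objective: simpler
-- what changed: Replaces the loop over four case variants of 'no' with a single normalization (string.lower()) followed by one 'no' membership test, keeping the case-sensitive 'nah' test on the original string.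
import Mathlib
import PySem

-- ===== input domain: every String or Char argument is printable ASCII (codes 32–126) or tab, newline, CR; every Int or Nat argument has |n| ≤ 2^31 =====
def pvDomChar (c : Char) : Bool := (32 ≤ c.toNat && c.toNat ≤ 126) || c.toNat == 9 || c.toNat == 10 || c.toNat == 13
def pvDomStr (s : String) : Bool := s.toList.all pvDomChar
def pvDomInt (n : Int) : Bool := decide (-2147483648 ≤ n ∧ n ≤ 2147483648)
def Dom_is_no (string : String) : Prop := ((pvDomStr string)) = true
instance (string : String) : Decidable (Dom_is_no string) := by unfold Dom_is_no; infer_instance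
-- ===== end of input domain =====

-- B replaces A's loop over four case variants of "no" by one lower() normalization
-- followed by a single "no" test (plus the unchanged case-sensitive "nah" test): simpler.

-- ===== PORT A =====
-- the for-loop over substring_list with its early return
def isNoLoop (subs : List String) (string : String) : Bool :=
  match subs with
  | [] => false                    -- fell through the loop: return output (= False)
  | sub :: rest =>
      if PySem.Str.isIn sub string then true   -- output = True; return output
      else isNoLoop rest string

def is_no (string : String) : Bool :=
  isNoLoop ["no", "No", "NO", "nO", "nah"] string

-- ===== PORT B =====
def is_no_alt (string : String) : Bool :=
  PySem.Str.isIn "no" (PySem.Str.lower string) || PySem.Str.isIn "nah" string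

-- ===== PRECONDITION & SPEC =====
def Spec_is_no (string : String) (out : Bool) : Prop := out = is_no_alt string
instance (string : String) (out : Bool) : Decidable (Spec_is_no string out) := by unfold Spec_is_no; infer_instance

-- ===== CLAIM (what is proved, stated in full; the proofs are below) =====
def Claim_equal_is_no : Prop := ∀ (string : String), Dom_is_no string → Spec_is_no string (is_no string)

-- ===== LEMMAS AND PROOFS =====

-- lowerChar only hits 'n' from 'n' or 'N'
lemma lowerChar_eq_n (c : Char) (h : PySem.Chars.lowerChar c = 'n') : c = 'n' ∨ c = 'N' := by
  unfold PySem.Chars.lowerChar PySem.Chars.isupper at h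
  by_cases hu : ('A' ≤ c ∧ c ≤ 'Z')
  · have hb : 65 ≤ c.toNat ∧ c.toNat ≤ 90 := ⟨hu.1, hu.2⟩
    simp [hu.1, hu.2] at h
    have ht := congrArg Char.toNat h
    rw [Char.toNat_ofNat] at ht
    rw [if_pos (by constructor; omega)] at ht
    have hc : c.toNat = 78 := by
      have : ('n' : Char).toNat = 110 := by decide
      omega
    have h2 := congrArg Char.ofNat hc
    rw [Char.ofNat_toNat] at h2
    right; rw [h2]
  · have hcond : ¬((decide ('A' ≤ c) && decide (c ≤ 'Z')) = true) := by simpa using hu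
    rw [if_neg hcond] at h
    exact Or.inl h

-- lowerChar only hits 'o' from 'o' or 'O'
lemma lowerChar_eq_o (c : Char) (h : PySem.Chars.lowerChar c = 'o') : c = 'o' ∨ c = 'O' := by
  unfold PySem.Chars.lowerChar PySem.Chars.isupper at h
  by_cases hu : ('A' ≤ c ∧ c ≤ 'Z')
  · have hb : 65 ≤ c.toNat ∧ c.toNat ≤ 90 := ⟨hu.1, hu.2⟩
    simp [hu.1, hu.2] at h
    have ht := congrArg Char.toNat h
    rw [Char.toNat_ofNat] at ht
    rw [if_pos (by constructor; omega)] at ht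
    have hc : c.toNat = 79 := by
      have : ('o' : Char).toNat = 111 := by decide
      omega
    have h2 := congrArg Char.ofNat hc
    rw [Char.ofNat_toNat] at h2
    right; rw [h2]
  · have hcond : ¬((decide ('A' ≤ c) && decide (c ≤ 'Z')) = true) := by simpa using hu
    rw [if_neg hcond] at h
    exact Or.inl h

-- an infix of a mapped list comes from an infix of the original
lemma infix_map_iff (f : Char → Char) (l cs : List Char) :
    l <:+: cs.map f ↔ ∃ l', l' <:+: cs ∧ l'.map f = l := by
  constructor
  · rintro ⟨s, t, h⟩
    rcases List.map_eq_append_iff.mp h.symm with ⟨u, v, hcs, hu, hv⟩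
    rcases List.map_eq_append_iff.mp hu with ⟨u1, u2, hu', h1, h2⟩
    exact ⟨u2, ⟨u1, v, by rw [hcs, hu']⟩, h2⟩
  · rintro ⟨l', hl, rfl⟩
    exact hl.map f

-- "no" occurs in the lowercased text iff one of the four case variants occurs
lemma no_infix_lower (cs : List Char) :
    (['n', 'o'] <:+: PySem.Chars.lower cs) ↔
      (['n', 'o'] <:+: cs ∨ ['N', 'o'] <:+: cs ∨ ['N', 'O'] <:+: cs ∨ ['n', 'O'] <:+: cs) := by
  unfold PySem.Chars.lower
  rw [infix_map_iff]
  constructor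
  · rintro ⟨l', hl, hm⟩
    obtain ⟨a, b, rfl⟩ : ∃ a b, l' = [a, b] := by
      cases l' with
      | nil => simp at hm
      | cons a t =>
        cases t with
        | nil => simp at hm
        | cons b t2 =>
          cases t2 with
          | nil => exact ⟨a, b, rfl⟩
          | cons c t3 => simp at hm
    simp only [List.map_cons, List.map_nil, List.cons.injEq, and_true] at hm
    rcases lowerChar_eq_n a hm.1 with rfl | rfl <;>
      rcases lowerChar_eq_o b hm.2 with rfl | rfl
    · exact Or.inl hl
    · exact Or.inr (Or.inr (Or.inr hl))
    · exact Or.inr (Or.inl hl)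
    · exact Or.inr (Or.inr (Or.inl hl))
  · rintro (h | h | h | h)
    · exact ⟨['n', 'o'], h, by decide⟩
    · exact ⟨['N', 'o'], h, by decide⟩
    · exact ⟨['N', 'O'], h, by decide⟩
    · exact ⟨['n', 'O'], h, by decide⟩

-- ===== VERDICT (by name: the statement is the Claim_ definition above) =====
theorem is_no_spec : Claim_equal_is_no := by
  intro string _
  simp only [Spec_is_no, is_no, isNoLoop, is_no_alt]
  rw [Bool.eq_iff_iff]
  simp only [Bool.if_true_left, Bool.or_false, Bool.or_eq_true,
    PySem.Str.isIn_iff_infix, PySem.Str.toList_lower, decide_eq_true_eq]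
  rw [show ("no" : String).toList = ['n', 'o'] from rfl,
      show ("No" : String).toList = ['N', 'o'] from rfl,
      show ("NO" : String).toList = ['N', 'O'] from rfl,
      show ("nO" : String).toList = ['n', 'O'] from rfl]
  rw [no_infix_lower]
  tauto
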